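-- pv_equiv track=rewrite | github.com/Junaem/Algorithm_SSAFY | SWEA/0829/1220_magnetic/s1.py | magnito
-- ===== SOURCE A (Python) =====
-- def magnito(matrix, N):
--     cnt = 0
--     for r in range(N):
--         for c in range(N):
--             if matrix[r][c] == 1:
--                 for dr in range(r, N):
--                     if matrix[dr][c] == 1:
--                         matrix[dr][c] = 0
--                     elif matrix[dr][c] == 2:
--                         cnt +=1
--                         break
--     return cnt
-- ===== SOURCE B (Python) =====
-- def magnito(matrix, N):
--     # One top-to-bottom pass per column with a pending-magnet flag; no inner rescan.
--     # Unlike A, this does not mutate matrix (return value is identical).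
--     cnt = 0
--     for c in range(N):
--         have_one = False
--         for r in range(N):
--             v = matrix[r][c]
--             if v == 1:
--                 have_one = True
--             elif v == 2 and have_one:
--                 cnt += 1
--                 have_one = False
--     return cnt
-- ===== Notes on version B (the rewrite author's own statement) =====
-- stated objective: simpler
-- what changed: Replaces A's per-1 nested downward rescan with matrix mutation by a single stateful top-to-bottom pass per column carrying a pending-magnet flag (no mutation, no inner loop).
import Mathlib
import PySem

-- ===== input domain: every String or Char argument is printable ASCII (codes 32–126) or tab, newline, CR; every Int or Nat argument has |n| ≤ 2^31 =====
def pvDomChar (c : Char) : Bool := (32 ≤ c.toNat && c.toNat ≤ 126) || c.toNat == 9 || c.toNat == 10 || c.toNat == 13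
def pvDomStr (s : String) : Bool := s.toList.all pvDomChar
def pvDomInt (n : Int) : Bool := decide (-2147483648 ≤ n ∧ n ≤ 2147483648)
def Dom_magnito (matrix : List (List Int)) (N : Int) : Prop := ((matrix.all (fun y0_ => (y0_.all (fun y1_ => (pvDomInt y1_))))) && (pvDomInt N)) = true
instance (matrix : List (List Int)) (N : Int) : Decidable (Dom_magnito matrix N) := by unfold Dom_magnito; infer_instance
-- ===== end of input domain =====

-- B replaces A's per-1 nested downward rescan (with matrix mutation) by one stateful
-- top-to-bottom pass per column with a pending flag; A mutates `matrix` in place (zeroes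
-- 1-cells), B does not — the equivalence proved is about the RETURN value only.

-- ===== PORT A =====
-- matrix[r][c] (indices here are always ≥ 0, from range()); default 0 is never the value
-- used on admitted inputs (Pre_ keeps all reads in range).
def getCell (mat : List (List Int)) (r c : Int) : Int :=
  PySem.List.pyGetD (PySem.List.pyGetD mat r []) c 0

-- matrix[r][c] = x  (exact for the nonneg in-range indices A assigns at: A writes only
-- at cells it has just read as 1, which are in range).
def setCell (mat : List (List Int)) (r c : Int) (x : Int) : List (List Int) :=
  mat.set r.toNat ((PySem.List.pyGetD mat r []).set c.toNat x)

-- the inner 'for dr in range(r, N)' loop with its break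
def magInnerA (c : Int) (drs : List Int) (mat : List (List Int)) (cnt : Int) :
    List (List Int) × Int :=
  match drs with
  | [] => (mat, cnt)
  | dr :: rest =>
    if getCell mat dr c = 1 then magInnerA c rest (setCell mat dr c 0) cnt
    else if getCell mat dr c = 2 then (mat, cnt + 1)
    else magInnerA c rest mat cnt

def magCellStep (N : Int) (st : List (List Int) × Int) (r c : Int) : List (List Int) × Int :=
  if getCell st.1 r c = 1 then magInnerA c (PySem.List.pyRange r N 1) st.1 st.2 else st

def magRowStep (N : Int) (st : List (List Int) × Int) (r : Int) : List (List Int) × Int :=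
  (PySem.List.pyRange 0 N 1).foldl (fun st c => magCellStep N st r c) st

def magnito (matrix : List (List Int)) (N : Int) : Int :=
  ((PySem.List.pyRange 0 N 1).foldl (fun st r => magRowStep N st r) (matrix, 0)).2

-- ===== PORT B =====
-- one step of B's column pass: state = (cnt, have_one), v = matrix[r][c]
def altColStep (st : Int × Bool) (v : Int) : Int × Bool :=
  if v = 1 then (st.1, true)
  else if v = 2 ∧ st.2 = true then (st.1 + 1, false)
  else st

def magnito_alt (matrix : List (List Int)) (N : Int) : Int :=
  (PySem.List.pyRange 0 N 1).foldl (fun cnt c =>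
    ((PySem.List.pyRange 0 N 1).foldl
      (fun st r => altColStep st (getCell matrix r c)) (cnt, false)).1) 0

-- ===== PRECONDITION & SPEC =====
-- Exactly the inputs on which the Python A returns (no IndexError): all N² reads
-- matrix[r][c], r,c < N, are in range. (For N ≤ 0 nothing is read.)
def Pre_magnito (matrix : List (List Int)) (N : Int) : Prop :=
  N ≤ (matrix.length : Int) ∧ ∀ row ∈ matrix.take N.toNat, N ≤ (row.length : Int)
instance (matrix : List (List Int)) (N : Int) : Decidable (Pre_magnito matrix N) := by
  unfold Pre_magnito; infer_instance

def pvWitness_magnito : List (List Int) × Int := ([[1, 0], [2, 2]], 2)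

def Spec_magnito (matrix : List (List Int)) (N : Int) (out : Int) : Prop := out = magnito_alt matrix N
instance (matrix : List (List Int)) (N : Int) (out : Int) : Decidable (Spec_magnito matrix N out) := by unfold Spec_magnito; infer_instance

-- ===== CLAIM (what is proved, stated in full; the proofs are below) =====
def Claim_equal_magnito : Prop := ∀ (matrix : List (List Int)) (N : Int), Dom_magnito matrix N → Pre_magnito matrix N → Spec_magnito matrix N (magnito matrix N)

-- ===== LEMMAS AND PROOFS =====

-- pure model of A's inner loop acting on one column suffix: zero leading 1s, stop at the
-- first 2 (hit) or the end
def zeroDown : List Int → List Int × Bool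
  | [] => ([], false)
  | v :: t =>
    if v = 1 then ((zeroDown t).1.cons 0, (zeroDown t).2)
    else if v = 2 then (v :: t, true)
    else ((zeroDown t).1.cons v, (zeroDown t).2)

theorem zeroDown_length (l : List Int) : (zeroDown l).1.length = l.length := by
  induction l with
  | nil => rfl
  | cons v t ih => simp only [zeroDown]; split_ifs <;> simp [ih]

-- pure model of A's outer scan of one column
def colA : List Int → Int
  | [] => 0
  | v :: t =>
    if v = 1 then (if (zeroDown t).2 then 1 else 0) + colA (zeroDown t).1
    else colA t
termination_by l => l.length
decreasing_by all_goals simp [zeroDown_length]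

-- pure model of B's column pass
def colRun : Bool → List Int → Int
  | _, [] => 0
  | flag, v :: t =>
    if v = 1 then colRun true t
    else if v = 2 ∧ flag = true then 1 + colRun false t
    else colRun flag t

theorem colRun_true (l : List Int) :
    colRun true l = (if (zeroDown l).2 then 1 else 0) + colRun false (zeroDown l).1 := by
  induction l with
  | nil => simp [colRun, zeroDown]
  | cons v t ih =>
    by_cases h1 : v = 1
    · subst h1; simp [colRun, zeroDown, ih]
    · by_cases h2 : v = 2
      · subst h2; simp [colRun, zeroDown]
      · simp [colRun, zeroDown, h1, h2, ih]

theorem colA_eq (l : List Int) : colA l = colRun false l := by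
  induction l using colA.induct with
  | case1 => simp [colA, colRun]
  | case2 t ih =>
    simp only [colA, colRun, ih, colRun_true]
    simp
  | case3 v t hv ih =>
    simp only [colA, colRun, if_neg hv, ih]
    by_cases h2 : v = 2 <;> simp [h2]

-- B's foldl over a column is colRun
theorem altColStep_foldl (l : List Int) (cnt : Int) (flag : Bool) :
    (l.foldl altColStep (cnt, flag)).1 = cnt + colRun flag l := by
  induction l generalizing cnt flag with
  | nil => simp [colRun]
  | cons v t ih =>
    by_cases h1 : v = 1
    · subst h1; simp [altColStep, colRun, ih]
    · by_cases h2 : v = 2 ∧ flag = true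
      · obtain ⟨h2, hf⟩ := h2; subst h2; subst hf
        simp [altColStep, colRun, h1, ih]; ring
      · simp only [List.foldl_cons, altColStep, if_neg h1, if_neg h2, ih]
        rw [colRun, if_neg h1, if_neg h2]

-- reading a cell whose value is 1 proves both indices are in range, so setCell there is
-- a genuine pointwise update
theorem getCell_setCell (mat : List (List Int)) (r c : Int) (hr : 0 ≤ r) (hc : 0 ≤ c)
    (h1 : getCell mat r c = 1) (x : Int) :
    ∀ r' c', 0 ≤ r' → 0 ≤ c' →
      getCell (setCell mat r c x) r' c' = if r' = r ∧ c' = c then x else getCell mat r' c' := by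
  intro r' c' hr' hc'
  unfold getCell setCell at *
  rw [PySem.List.pyGetD_of_nonneg _ _ hr, PySem.List.pyGetD_of_nonneg _ _ hc] at h1
  rw [PySem.List.pyGetD_of_nonneg _ _ hr', PySem.List.pyGetD_of_nonneg _ _ hc',
      PySem.List.pyGetD_of_nonneg _ _ hr', PySem.List.pyGetD_of_nonneg _ _ hc',
      PySem.List.pyGetD_of_nonneg _ _ hr]
  simp only [List.getD_eq_getElem?_getD] at h1 ⊢
  have hrlt : r.toNat < mat.length := by
    rcases Nat.lt_or_ge r.toNat mat.length with h | h
    · exact h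
    · rw [List.getElem?_eq_none h] at h1; simp at h1
  rw [List.getElem?_eq_getElem hrlt, Option.getD_some] at h1 ⊢
  have hclt : c.toNat < (mat[r.toNat]).length := by
    rcases Nat.lt_or_ge c.toNat (mat[r.toNat]).length with h | h
    · exact h
    · rw [List.getElem?_eq_none h] at h1; simp at h1
  by_cases hR : r'.toNat = r.toNat
  · rw [hR, List.getElem?_set_self (by simpa using hrlt), Option.getD_some]
    by_cases hC : c'.toNat = c.toNat
    · rw [hC, List.getElem?_set_self (by simpa using hclt), Option.getD_some,
          if_pos ⟨by omega, by omega⟩]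
    · rw [List.getElem?_set_ne (by omega), if_neg (by omega),
          List.getElem?_eq_getElem hrlt, Option.getD_some]
  · rw [List.getElem?_set_ne (by omega), if_neg (by omega)]

-- characterisation of A's inner loop: the count grows by the hit bit of zeroDown on the
-- column values along drs, those values become (zeroDown …).1, everything else is unchanged
theorem magInnerA_spec (c : Int) (hc : 0 ≤ c) :
    ∀ (drs : List Int), drs.Nodup → (∀ d ∈ drs, 0 ≤ d) →
    ∀ (mat : List (List Int)) (cnt : Int),
      (magInnerA c drs mat cnt).2
          = cnt + (if (zeroDown (drs.map (fun d => getCell mat d c))).2 then 1 else 0)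
      ∧ (drs.map (fun d => getCell (magInnerA c drs mat cnt).1 d c))
          = (zeroDown (drs.map (fun d => getCell mat d c))).1
      ∧ (∀ r' c', 0 ≤ r' → 0 ≤ c' → (c' ≠ c ∨ r' ∉ drs) →
          getCell (magInnerA c drs mat cnt).1 r' c' = getCell mat r' c') := by
  intro drs
  induction drs with
  | nil => intro _ _ mat cnt; simp [magInnerA, zeroDown]
  | cons d rest ih =>
    intro hnd hnn mat cnt
    have hd : 0 ≤ d := hnn d (by simp)
    have hrestnn : ∀ x ∈ rest, 0 ≤ x := fun x hx => hnn x (by simp [hx])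
    have hdrest : d ∉ rest := (List.nodup_cons.mp hnd).1
    have hrestnd : rest.Nodup := (List.nodup_cons.mp hnd).2
    by_cases hv1 : getCell mat d c = 1
    · have hset := getCell_setCell mat d c hd hc hv1 0
      have hmap : rest.map (fun d' => getCell (setCell mat d c 0) d' c)
          = rest.map (fun d' => getCell mat d' c) := by
        apply List.map_congr_left
        intro d' hd'
        rw [hset d' c (hrestnn d' hd') hc]
        rw [if_neg (by rintro ⟨h, -⟩; exact hdrest (h ▸ hd'))]
      obtain ⟨ih1, ih2, ih3⟩ := ih hrestnd hrestnn (setCell mat d c 0) cnt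
      have hstep : magInnerA c (d :: rest) mat cnt = magInnerA c rest (setCell mat d c 0) cnt := by
        simp only [magInnerA]; rw [if_pos hv1]
      refine ⟨?_, ?_, ?_⟩
      · rw [hstep, ih1, hmap]
        simp [zeroDown, hv1]
      · rw [hstep, List.map_cons]
        have hhead : getCell (magInnerA c rest (setCell mat d c 0) cnt).1 d c = 0 := by
          rw [ih3 d c hd hc (Or.inr hdrest), hset d c hd hc, if_pos ⟨rfl, rfl⟩]
        rw [hhead, ih2, hmap]
        simp [zeroDown, hv1]
      · intro r' c' hr' hc' hout
        rw [hstep, ih3 r' c' hr' hc' (hout.imp id (fun h hm => h (List.mem_cons_of_mem d hm))), hset r' c' hr' hc',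
            if_neg (by rintro ⟨h1', h2'⟩
                       exact hout.elim (fun h => h h2') (fun h => h (h1' ▸ List.mem_cons_self)))]
    · by_cases hv2 : getCell mat d c = 2
      · have hstep : magInnerA c (d :: rest) mat cnt = (mat, cnt + 1) := by
          simp only [magInnerA]; rw [if_neg hv1, if_pos hv2]
        refine ⟨?_, ?_, ?_⟩
        · rw [hstep]; simp [zeroDown, hv2]
        · rw [hstep]; simp [zeroDown, hv2]
        · intro r' c' _ _ _; rw [hstep]
      · have hstep : magInnerA c (d :: rest) mat cnt = magInnerA c rest mat cnt := by
          simp only [magInnerA]; rw [if_neg hv1, if_neg hv2]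
        obtain ⟨ih1, ih2, ih3⟩ := ih hrestnd hrestnn mat cnt
        refine ⟨?_, ?_, ?_⟩
        · rw [hstep, ih1]; simp [zeroDown, hv1, hv2]
        · rw [hstep, List.map_cons, ih2,
              ih3 d c hd hc (Or.inr hdrest)]
          simp [zeroDown, hv1, hv2]
        · intro r' c' hr' hc' hout
          rw [hstep, ih3 r' c' hr' hc' (hout.imp id (fun h hm => h (List.mem_cons_of_mem d hm)))]

-- one full row of A's double loop, over an arbitrary nodup list of columns
theorem magRow_spec (N r : Int) (hr : 0 ≤ r) (hrN : r < N) :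
    ∀ (cs : List Int), cs.Nodup → (∀ x ∈ cs, 0 ≤ x) →
    ∀ (mat : List (List Int)) (cnt : Int),
      ((cs.foldl (fun st c => magCellStep N st r c) (mat, cnt)).2
        + (cs.map (fun c => colA ((PySem.List.pyRange (r+1) N 1).map
            (fun d => getCell (cs.foldl (fun st c => magCellStep N st r c) (mat, cnt)).1 d c)))).sum
        = cnt + (cs.map (fun c => colA ((PySem.List.pyRange r N 1).map
            (fun d => getCell mat d c)))).sum)
      ∧ (∀ r' c', 0 ≤ r' → 0 ≤ c' → c' ∉ cs →
          getCell (cs.foldl (fun st c => magCellStep N st r c) (mat, cnt)).1 r' c'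
            = getCell mat r' c') := by
  have hcons : PySem.List.pyRange r N 1 = r :: PySem.List.pyRange (r+1) N 1 :=
    PySem.List.pyRange_one_cons hrN
  have hdrsnn : ∀ d ∈ PySem.List.pyRange r N 1, 0 ≤ d := by
    intro d hd; rw [PySem.List.mem_pyRange_one] at hd; omega
  have htailnn : ∀ d ∈ PySem.List.pyRange (r+1) N 1, 0 ≤ d := by
    intro d hd; rw [PySem.List.mem_pyRange_one] at hd; omega
  intro cs
  induction cs with
  | nil => intro _ _ mat cnt; simp
  | cons c0 cs' ih =>
    intro hnd hnn mat cnt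
    have hc0 : 0 ≤ c0 := hnn c0 (by simp)
    have hcs'nn : ∀ x ∈ cs', 0 ≤ x := fun x hx => hnn x (by simp [hx])
    have hc0cs' : c0 ∉ cs' := (List.nodup_cons.mp hnd).1
    have hcs'nd : cs'.Nodup := (List.nodup_cons.mp hnd).2
    rw [List.foldl_cons]
    by_cases h1 : getCell mat r c0 = 1
    · have hF : magCellStep N (mat, cnt) r c0
          = magInnerA c0 (PySem.List.pyRange r N 1) mat cnt := by
        simp only [magCellStep]; rw [if_pos h1]
    
      obtain ⟨s1, s2, s3⟩ := magInnerA_spec c0 hc0 (PySem.List.pyRange r N 1)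
        (PySem.List.nodup_pyRange_one r N) hdrsnn mat cnt
      set M1 := (magInnerA c0 (PySem.List.pyRange r N 1) mat cnt).1 with hM1
      set cnt1 := (magInnerA c0 (PySem.List.pyRange r N 1) mat cnt).2 with hcnt1
      have hvals : (PySem.List.pyRange r N 1).map (fun d => getCell mat d c0)
          = 1 :: (PySem.List.pyRange (r+1) N 1).map (fun d => getCell mat d c0) := by
        rw [hcons, List.map_cons, h1]
      set p := zeroDown ((PySem.List.pyRange (r+1) N 1).map (fun d => getCell mat d c0)) with hp
      have hzd : zeroDown ((PySem.List.pyRange r N 1).map (fun d => getCell mat d c0))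
          = (0 :: p.1, p.2) := by
        rw [hvals]; simp [zeroDown, hp]
      have hs1 : cnt1 = cnt + (if p.2 then 1 else 0) := by rw [s1, hzd]
      have hs2 : (PySem.List.pyRange (r+1) N 1).map (fun d => getCell M1 d c0) = p.1 := by
        have := s2
        rw [hzd, hcons, List.map_cons] at this
        exact (List.cons.injEq _ _ _ _).mp this |>.2
      obtain ⟨ih1, ih2⟩ := ih hcs'nd hcs'nn M1 cnt1
      rw [hF]
      constructor
      · set st := cs'.foldl (fun st c => magCellStep N st r c) (M1, cnt1) with hst
        rw [List.map_cons, List.map_cons, List.sum_cons, List.sum_cons]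
        have hterm0 : (PySem.List.pyRange (r+1) N 1).map (fun d => getCell st.1 d c0)
            = p.1 := by
          rw [← hs2]
          exact List.map_congr_left fun d hd => ih2 d c0 (htailnn d hd) hc0 hc0cs'
        have hfull0 : colA ((PySem.List.pyRange r N 1).map (fun d => getCell mat d c0))
            = (if p.2 then 1 else 0) + colA p.1 := by
          rw [hvals]; simp [colA, hp]
        have hfulls : cs'.map (fun c => colA ((PySem.List.pyRange r N 1).map
              (fun d => getCell M1 d c)))
            = cs'.map (fun c => colA ((PySem.List.pyRange r N 1).map
              (fun d => getCell mat d c))) := by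
          apply List.map_congr_left
          intro c' hc'
          congr 1
          apply List.map_congr_left
          intro d hd
          exact s3 d c' (hdrsnn d hd) (hcs'nn c' hc')
            (Or.inl (fun h => hc0cs' (h ▸ hc')))
        rw [hterm0, hfull0, ← hfulls]
        omega
      · intro r' c' hr' hc' hnot
        rw [ih2 r' c' hr' hc' (fun h => hnot (List.mem_cons_of_mem c0 h)),
            s3 r' c' hr' hc' (Or.inl (fun h => hnot (h ▸ List.mem_cons_self)))]
    · have hF : magCellStep N (mat, cnt) r c0 = (mat, cnt) := by
        simp only [magCellStep]; rw [if_neg h1]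
      rw [hF]
      obtain ⟨ih1, ih2⟩ := ih hcs'nd hcs'nn mat cnt
      constructor
      · set st := cs'.foldl (fun st c => magCellStep N st r c) (mat, cnt) with hst
        rw [List.map_cons, List.map_cons, List.sum_cons, List.sum_cons]
        have hterm0 : (PySem.List.pyRange (r+1) N 1).map (fun d => getCell st.1 d c0)
            = (PySem.List.pyRange (r+1) N 1).map (fun d => getCell mat d c0) :=
          List.map_congr_left fun d hd => ih2 d c0 (htailnn d hd) hc0 hc0cs'
        have hfull0 : colA ((PySem.List.pyRange r N 1).map (fun d => getCell mat d c0))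
            = colA ((PySem.List.pyRange (r+1) N 1).map (fun d => getCell mat d c0)) := by
          rw [hcons, List.map_cons]
          simp [colA, h1]
        rw [hterm0, hfull0]
        omega
      · intro r' c' hr' hc' hnot
        exact ih2 r' c' hr' hc' (fun h => hnot (List.mem_cons_of_mem c0 h))

-- the outer loop, peeled row by row
theorem magOuter_spec (N : Int) (k : Nat) :
    ∀ (r : Int), 0 ≤ r → (N - r).toNat = k →
    ∀ (mat : List (List Int)) (cnt : Int),
      ((PySem.List.pyRange r N 1).foldl (fun st r => magRowStep N st r) (mat, cnt)).2
        = cnt + ((PySem.List.pyRange 0 N 1).map (fun c =>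
            colA ((PySem.List.pyRange r N 1).map (fun d => getCell mat d c)))).sum := by
  have hcs0nn : ∀ x ∈ PySem.List.pyRange 0 N 1, 0 ≤ x := by
    intro x hx; rw [PySem.List.mem_pyRange_one] at hx; omega
  induction k with
  | zero =>
    intro r hr hk mat cnt
    rw [PySem.List.pyRange_one_eq_nil (by omega)]
    simp [colA]
  | succ k ih =>
    intro r hr hk mat cnt
    have hrN : r < N := by omega
    have hcons := PySem.List.pyRange_one_cons hrN
    rw [hcons, List.foldl_cons]
    obtain ⟨row1, -⟩ := magRow_spec N r hr hrN (PySem.List.pyRange 0 N 1)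
      (PySem.List.nodup_pyRange_one 0 N) hcs0nn mat cnt
    rw [hcons] at row1
    have hIH := ih (r+1) (by omega) (by omega)
      (magRowStep N (mat, cnt) r).1 (magRowStep N (mat, cnt) r).2
    rw [Prod.mk.eta] at hIH
    rw [hIH]
    rw [show magRowStep N (mat, cnt) r
        = (PySem.List.pyRange 0 N 1).foldl (fun st c => magCellStep N st r c) (mat, cnt) from rfl]
    omega

-- ===== VERDICT (by name: the statement is the Claim_ definition above) =====
theorem magnito_spec : Claim_equal_magnito := by
  intro matrix N _ _
  unfold Spec_magnito magnito magnito_alt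
  rw [magOuter_spec N (N - 0).toNat 0 le_rfl rfl matrix 0]
  have hin : ∀ (cnt c : Int),
      ((PySem.List.pyRange 0 N 1).foldl
        (fun st r => altColStep st (getCell matrix r c)) (cnt, false)).1
      = cnt + colRun false ((PySem.List.pyRange 0 N 1).map (fun r => getCell matrix r c)) := by
    intro cnt c
    rw [← List.foldl_map, altColStep_foldl]
  have hB : (PySem.List.pyRange 0 N 1).foldl (fun cnt c =>
        ((PySem.List.pyRange 0 N 1).foldl
          (fun st r => altColStep st (getCell matrix r c)) (cnt, false)).1) 0
      = (PySem.List.pyRange 0 N 1).foldl (fun cnt c =>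
        cnt + colRun false ((PySem.List.pyRange 0 N 1).map (fun r => getCell matrix r c))) 0 :=
    PySem.List.foldl_congr_mem _ _ _ _ (fun acc x _ => hin acc x)
  rw [hB, PySem.List.foldl_add]
  simp [colA_eq]
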